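-- pv_equiv track=rewrite | github.com/gurramkshethra-droid/Early_strength_discovery | app.py | chatbot_answer
-- ===== SOURCE A (Python) =====
-- def is_career_related_question(text):
--     text = str(text).strip().lower()
--     if not text:
--         return False
--
--     career_keywords = [
--         "career", "job", "internship", "work", "profession", "education", "study", "college", "university",
--         "school", "exam", "skills", "skill", "talent", "stream", "interest", "subject", "course", "degree",
--         "training", "placement", "resume", "interview", "admission", "scholarship", "government", "ssc", "upsc",
--         "railway", "banking", "business", "management", "marketing", "finance", "software", "coding", "programming",
--         "data", "analytics", "science", "engineering", "arts", "music", "dance", "sports", "teacher", "doctor",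
--         "lawyer", "design", "media", "journalism", "architecture", "hospitality", "nurse", "health",
--         "research", "civil service"
--     ]
--     unrelated_keywords = [
--         "movie", "movies", "series", "celebrity", "hollywood", "bollywood", "netflix", "hotstar", "youtube",
--         "instagram", "facebook", "twitter", "recipe", "restaurant", "travel", "flight", "hotel", "shopping",
--         "fashion", "stock", "politics", "weather", "joke", "funny", "gaming", "game"
--     ]
--
--     if any(keyword in text for keyword in unrelated_keywords):
--         return False
--     return any(keyword in text for keyword in career_keywords)
--
-- def chatbot_answer(question):
--     text = str(question).strip().lower()
--     if not text:
--         return "Please ask a career-related question so I can help you."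
--     if not is_career_related_question(text):
--         return "I can only answer student career guidance, education, internship, and government job questions. Please ask something related to career planning or academics."
--     if any(term in text for term in ["engineer", "coding", "software", "tech", "data", "analysis"]):
--         return "For a technology career, focus on problem solving, coding practice, data skills, and building real projects relevant to your interests."
--     if any(term in text for term in ["doctor", "medicine", "medical", "health", "nurse"]):
--         return "A healthcare career often requires strong science scores, practical training, and preparation for medical or nursing entrance exams."
--     if any(term in text for term in ["musician", "music", "sing", "band"]):
--         return "To build a career in music, practice consistently, learn theory and performance skills, and look for internships or ensembles to gain experience."
--     if any(term in text for term in ["athlete", "sports", "fitness", "coach", "physical"]):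
--         return "A sports career benefits from disciplined training, coaching experience, and balancing fitness with nutrition and teamwork."
--     if any(term in text for term in ["business", "entrepreneur", "management", "commerce", "marketing", "finance"]):
--         return "For business and commerce careers, focus on communication, leadership, analytics, and practical experience through internships and projects."
--     if any(term in text for term in ["government", "ssc", "upsc", "railway", "banking", "civil service"]):
--         return "Government jobs need preparation for exams, strong general knowledge, and a disciplined study plan tailored to the specific service you want."
--     if any(term in text for term in ["internship", "intern"]):
--         return "Look for internships in the fields you enjoy, build a strong application, and use those experiences to decide your next academic or career step."
--     if any(term in text for term in ["teacher", "education", "school", "teaching"]):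
--         return "A teaching career requires subject mastery, communication skills, and practice through tutoring, volunteering, or education internships."
--     if any(term in text for term in ["design", "graphic", "ux", "creative", "media", "journalism"]):
--         return "Creative careers benefit from portfolios, practical projects, and networking with professionals in design, media, or content creation."
--     return "I can help with career paths, academic choices, internships, and student opportunities. Please ask about your interests, skills, or future career decisions."
-- ===== SOURCE B (Python) =====
-- EMPTY_MSG = "Please ask a career-related question so I can help you."
-- OFFTOPIC_MSG = "I can only answer student career guidance, education, internship, and government job questions. Please ask something related to career planning or academics."
-- DEFAULT_MSG = "I can help with career paths, academic choices, internships, and student opportunities. Please ask about your interests, skills, or future career decisions."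
--
-- UNRELATED_KEYWORDS = ["movie", "movies", "series", "celebrity", "hollywood", "bollywood", "netflix", "hotstar", "youtube", "instagram", "facebook", "twitter", "recipe", "restaurant", "travel", "flight", "hotel", "shopping", "fashion", "stock", "politics", "weather", "joke", "funny", "gaming", "game"]
--
-- CAREER_KEYWORDS = ["career", "job", "internship", "work", "profession", "education", "study", "college", "university", "school", "exam", "skills", "skill", "talent", "stream", "interest", "subject", "course", "degree", "training", "placement", "resume", "interview", "admission", "scholarship", "government", "ssc", "upsc", "railway", "banking", "business", "management", "marketing", "finance", "software", "coding", "programming", "data", "analytics", "science", "engineering", "arts", "music", "dance", "sports", "teacher", "doctor", "lawyer", "design", "media", "journalism", "architecture", "hospitality", "nurse", "health", "research", "civil service"]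
--
-- RULES = [(["engineer", "coding", "software", "tech", "data", "analysis"], "For a technology career, focus on problem solving, coding practice, data skills, and building real projects relevant to your interests."),
--          (["doctor", "medicine", "medical", "health", "nurse"], "A healthcare career often requires strong science scores, practical training, and preparation for medical or nursing entrance exams."),
--          (["musician", "music", "sing", "band"], "To build a career in music, practice consistently, learn theory and performance skills, and look for internships or ensembles to gain experience."),
--          (["athlete", "sports", "fitness", "coach", "physical"], "A sports career benefits from disciplined training, coaching experience, and balancing fitness with nutrition and teamwork."),
--          (["business", "entrepreneur", "management", "commerce", "marketing", "finance"], "For business and commerce careers, focus on communication, leadership, analytics, and practical experience through internships and projects."),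
--          (["government", "ssc", "upsc", "railway", "banking", "civil service"], "Government jobs need preparation for exams, strong general knowledge, and a disciplined study plan tailored to the specific service you want."),
--          (["internship", "intern"], "Look for internships in the fields you enjoy, build a strong application, and use those experiences to decide your next academic or career step."),
--          (["teacher", "education", "school", "teaching"], "A teaching career requires subject mastery, communication skills, and practice through tutoring, volunteering, or education internships."),
--          (["design", "graphic", "ux", "creative", "media", "journalism"], "Creative careers benefit from portfolios, practical projects, and networking with professionals in design, media, or content creation.")]
--
-- # One combined vocabulary of every keyword the chatbot ever looks for.
-- VOCAB = UNRELATED_KEYWORDS + CAREER_KEYWORDS + [k for ks, _ in RULES for k in ks]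
--
--
-- def chatbot_answer(question):
--     text = str(question).strip().lower()
--     if not text:
--         return EMPTY_MSG
--     # Single position-first scan of the text: collect every vocabulary keyword
--     # that occurs anywhere, into one matched set; all later decisions are set tests.
--     matched = set()
--     for i in range(len(text)):
--         for k in VOCAB:
--             if text.startswith(k, i):
--                 matched.add(k)
--     if not matched.isdisjoint(UNRELATED_KEYWORDS) or matched.isdisjoint(CAREER_KEYWORDS):
--         return OFFTOPIC_MSG
--     for keywords, response in RULES:
--         if not matched.isdisjoint(keywords):
--             return response
--     return DEFAULT_MSG
-- ===== Notes on version B (the rewrite author's own statement) =====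
-- stated objective: alternative
-- what changed: B replaces A's eleven keyword-first any(substring in text) scans with one position-first scan of the text that builds a set of all matched vocabulary keywords once, after which the off-topic screen and the nine-category cascade are plain set-disjointness tests against that index.
import Mathlib
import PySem

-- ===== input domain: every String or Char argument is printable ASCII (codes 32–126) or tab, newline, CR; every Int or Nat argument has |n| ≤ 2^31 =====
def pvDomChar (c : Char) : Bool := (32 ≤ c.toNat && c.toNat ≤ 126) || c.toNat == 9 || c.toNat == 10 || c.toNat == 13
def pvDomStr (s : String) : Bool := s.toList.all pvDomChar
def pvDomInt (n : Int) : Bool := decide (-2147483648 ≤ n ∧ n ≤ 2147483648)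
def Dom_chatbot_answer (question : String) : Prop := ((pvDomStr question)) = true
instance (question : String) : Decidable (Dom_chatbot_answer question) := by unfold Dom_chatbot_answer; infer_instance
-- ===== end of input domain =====

-- B replaces A's per-branch keyword-first substring scans with one position-first scan of the
-- text building a matched-keyword set once; every decision is then a set-disjointness test
-- (objective: a genuinely different traversal of the same cost).

-- ===== PORT A =====
def pvCareerKeywordsA : List String := ["career", "job", "internship", "work", "profession", "education", "study", "college", "university", "school", "exam", "skills", "skill", "talent", "stream", "interest", "subject", "course", "degree", "training", "placement", "resume", "interview", "admission", "scholarship", "government", "ssc", "upsc", "railway", "banking", "business", "management", "marketing", "finance", "software", "coding", "programming", "data", "analytics", "science", "engineering", "arts", "music", "dance", "sports", "teacher", "doctor", "lawyer", "design", "media", "journalism", "architecture", "hospitality", "nurse", "health", "research", "civil service"]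

def pvUnrelatedKeywordsA : List String := ["movie", "movies", "series", "celebrity", "hollywood", "bollywood", "netflix", "hotstar", "youtube", "instagram", "facebook", "twitter", "recipe", "restaurant", "travel", "flight", "hotel", "shopping", "fashion", "stock", "politics", "weather", "joke", "funny", "gaming", "game"]

def is_career_related_question (text : String) : Bool :=
  let text := PySem.Str.lower (PySem.Str.strip text)
  if text = "" then false
  else if pvUnrelatedKeywordsA.any (fun keyword => PySem.Str.isIn keyword text) then false
  else pvCareerKeywordsA.any (fun keyword => PySem.Str.isIn keyword text)

def chatbot_answer (question : String) : String :=
  let text := PySem.Str.lower (PySem.Str.strip question)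
  if text = "" then "Please ask a career-related question so I can help you."
  else if !(is_career_related_question text) then "I can only answer student career guidance, education, internship, and government job questions. Please ask something related to career planning or academics."
  else if (["engineer", "coding", "software", "tech", "data", "analysis"] : List String).any (fun term => PySem.Str.isIn term text) then "For a technology career, focus on problem solving, coding practice, data skills, and building real projects relevant to your interests."
  else if (["doctor", "medicine", "medical", "health", "nurse"] : List String).any (fun term => PySem.Str.isIn term text) then "A healthcare career often requires strong science scores, practical training, and preparation for medical or nursing entrance exams."
  else if (["musician", "music", "sing", "band"] : List String).any (fun term => PySem.Str.isIn term text) then "To build a career in music, practice consistently, learn theory and performance skills, and look for internships or ensembles to gain experience."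
  else if (["athlete", "sports", "fitness", "coach", "physical"] : List String).any (fun term => PySem.Str.isIn term text) then "A sports career benefits from disciplined training, coaching experience, and balancing fitness with nutrition and teamwork."
  else if (["business", "entrepreneur", "management", "commerce", "marketing", "finance"] : List String).any (fun term => PySem.Str.isIn term text) then "For business and commerce careers, focus on communication, leadership, analytics, and practical experience through internships and projects."
  else if (["government", "ssc", "upsc", "railway", "banking", "civil service"] : List String).any (fun term => PySem.Str.isIn term text) then "Government jobs need preparation for exams, strong general knowledge, and a disciplined study plan tailored to the specific service you want."
  else if (["internship", "intern"] : List String).any (fun term => PySem.Str.isIn term text) then "Look for internships in the fields you enjoy, build a strong application, and use those experiences to decide your next academic or career step."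
  else if (["teacher", "education", "school", "teaching"] : List String).any (fun term => PySem.Str.isIn term text) then "A teaching career requires subject mastery, communication skills, and practice through tutoring, volunteering, or education internships."
  else if (["design", "graphic", "ux", "creative", "media", "journalism"] : List String).any (fun term => PySem.Str.isIn term text) then "Creative careers benefit from portfolios, practical projects, and networking with professionals in design, media, or content creation."
  else "I can help with career paths, academic choices, internships, and student opportunities. Please ask about your interests, skills, or future career decisions."

-- ===== PORT B =====
def pvUnrelatedKeywordsB : List String := ["movie", "movies", "series", "celebrity", "hollywood", "bollywood", "netflix", "hotstar", "youtube", "instagram", "facebook", "twitter", "recipe", "restaurant", "travel", "flight", "hotel", "shopping", "fashion", "stock", "politics", "weather", "joke", "funny", "gaming", "game"]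

def pvCareerKeywordsB : List String := ["career", "job", "internship", "work", "profession", "education", "study", "college", "university", "school", "exam", "skills", "skill", "talent", "stream", "interest", "subject", "course", "degree", "training", "placement", "resume", "interview", "admission", "scholarship", "government", "ssc", "upsc", "railway", "banking", "business", "management", "marketing", "finance", "software", "coding", "programming", "data", "analytics", "science", "engineering", "arts", "music", "dance", "sports", "teacher", "doctor", "lawyer", "design", "media", "journalism", "architecture", "hospitality", "nurse", "health", "research", "civil service"]

def pvRules : List (List String × String) :=
  [(["engineer", "coding", "software", "tech", "data", "analysis"], "For a technology career, focus on problem solving, coding practice, data skills, and building real projects relevant to your interests."),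
   (["doctor", "medicine", "medical", "health", "nurse"], "A healthcare career often requires strong science scores, practical training, and preparation for medical or nursing entrance exams."),
   (["musician", "music", "sing", "band"], "To build a career in music, practice consistently, learn theory and performance skills, and look for internships or ensembles to gain experience."),
   (["athlete", "sports", "fitness", "coach", "physical"], "A sports career benefits from disciplined training, coaching experience, and balancing fitness with nutrition and teamwork."),
   (["business", "entrepreneur", "management", "commerce", "marketing", "finance"], "For business and commerce careers, focus on communication, leadership, analytics, and practical experience through internships and projects."),
   (["government", "ssc", "upsc", "railway", "banking", "civil service"], "Government jobs need preparation for exams, strong general knowledge, and a disciplined study plan tailored to the specific service you want."),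
   (["internship", "intern"], "Look for internships in the fields you enjoy, build a strong application, and use those experiences to decide your next academic or career step."),
   (["teacher", "education", "school", "teaching"], "A teaching career requires subject mastery, communication skills, and practice through tutoring, volunteering, or education internships."),
   (["design", "graphic", "ux", "creative", "media", "journalism"], "Creative careers benefit from portfolios, practical projects, and networking with professionals in design, media, or content creation.")]

-- VOCAB = UNRELATED_KEYWORDS + CAREER_KEYWORDS + [k for ks, _ in RULES for k in ks]
def pvVocab : List String :=
  pvUnrelatedKeywordsB ++ pvCareerKeywordsB ++ pvRules.flatMap (fun r => r.1)

-- the position-first scan: for i in range(len(text)), for k in VOCAB, if text.startswith(k, i): matched.add(k)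
-- (text.startswith(k, i) with 0 ≤ i ≤ len(text) is exactly 'k is a prefix of text[i:]' — ported by hand as Chars.startswith on drop i)
def pvMatched (t : List Char) : PySem.Set String :=
  (List.range t.length).foldl
    (fun m i => pvVocab.foldl
      (fun m k => if PySem.Chars.startswith (t.drop i) k.toList then PySem.Set.add m k else m) m)
    PySem.Set.empty

def pvFirstRule (matched : PySem.Set String) : List (List String × String) → String
  | [] => "I can help with career paths, academic choices, internships, and student opportunities. Please ask about your interests, skills, or future career decisions."
  | (keywords, response) :: rest =>
      if !(PySem.Set.isdisjoint matched keywords) then response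
      else pvFirstRule matched rest

def chatbot_answer_alt (question : String) : String :=
  let text := PySem.Str.lower (PySem.Str.strip question)
  if text = "" then "Please ask a career-related question so I can help you."
  else
    let matched := pvMatched text.toList
    if (!(PySem.Set.isdisjoint matched pvUnrelatedKeywordsB)) || PySem.Set.isdisjoint matched pvCareerKeywordsB then
      "I can only answer student career guidance, education, internship, and government job questions. Please ask something related to career planning or academics."
    else pvFirstRule matched pvRules

-- ===== PRECONDITION & SPEC =====
def Spec_chatbot_answer (question : String) (out : String) : Prop := out = chatbot_answer_alt question
instance (question : String) (out : String) : Decidable (Spec_chatbot_answer question out) := by unfold Spec_chatbot_answer; infer_instance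

-- ===== CLAIM (what is proved, stated in full; the proofs are below) =====
def Claim_equal_chatbot_answer : Prop := ∀ (question : String), Dom_chatbot_answer question → Spec_chatbot_answer question (chatbot_answer question)

-- ===== LEMMAS AND PROOFS =====

theorem pv_isupper_iff (c : Char) :
    (PySem.Chars.isupper c = true) ↔ (65 ≤ c.toNat ∧ c.toNat ≤ 90) := by
  simp only [PySem.Chars.isupper, Bool.and_eq_true, decide_eq_true_eq, Char.le_def,
    UInt32.le_iff_toNat_le]
  have h1 : 'A'.val.toNat = 65 := rfl
  have h2 : 'Z'.val.toNat = 90 := rfl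
  have h3 : c.val.toNat = c.toNat := rfl
  omega

-- a lowercased character keeps its toNat except uppercase letters, which shift by 32
theorem pv_toNat_lowerChar (c : Char) :
    (PySem.Chars.lowerChar c).toNat =
      if 65 ≤ c.toNat ∧ c.toNat ≤ 90 then c.toNat + 32 else c.toNat := by
  unfold PySem.Chars.lowerChar
  split_ifs with h1 h2 h3
  · rw [Char.toNat_ofNat]
    have hv : (c.toNat + 32).isValidChar := by
      have := (pv_isupper_iff c).mp h1; left; omega
    simp [hv]
  · exact absurd ((pv_isupper_iff c).mp h1) h2
  · exact absurd ((pv_isupper_iff c).mpr h3) h1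
  · rfl

theorem pv_isspace_lowerChar (c : Char) :
    PySem.Chars.isspace (PySem.Chars.lowerChar c) = PySem.Chars.isspace c := by
  unfold PySem.Chars.isspace
  rw [pv_toNat_lowerChar]
  split_ifs with h
  · rw [Bool.eq_iff_iff]
    simp only [Bool.or_eq_true, Bool.and_eq_true, decide_eq_true_eq]
    omega
  · rfl

theorem pv_lowerChar_idem (c : Char) :
    PySem.Chars.lowerChar (PySem.Chars.lowerChar c) = PySem.Chars.lowerChar c := by
  have h : PySem.Chars.isupper (PySem.Chars.lowerChar c) = false := by
    rw [Bool.eq_false_iff]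
    intro hc
    rw [pv_isupper_iff, pv_toNat_lowerChar] at hc
    split_ifs at hc with hP <;> omega
  set d := PySem.Chars.lowerChar c with hd
  unfold PySem.Chars.lowerChar
  rw [h]
  simp

theorem pv_lower_idem (l : List Char) :
    PySem.Chars.lower (PySem.Chars.lower l) = PySem.Chars.lower l := by
  simp [PySem.Chars.lower, List.map_map, Function.comp_def, pv_lowerChar_idem]

theorem pv_strip_lower_comm (l : List Char) :
    PySem.Chars.strip (PySem.Chars.lower l) = PySem.Chars.lower (PySem.Chars.strip l) := by
  have hdw : ∀ m : List Char,
      List.dropWhile PySem.Chars.isspace (PySem.Chars.lower m)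
        = PySem.Chars.lower (List.dropWhile PySem.Chars.isspace m) := by
    intro m
    simp [PySem.Chars.lower, List.dropWhile_map, Function.comp_def, pv_isspace_lowerChar]
  simp only [PySem.Chars.strip, PySem.Chars.lstrip, PySem.Chars.rstrip]
  rw [hdw]
  rw [show (PySem.Chars.lower (List.dropWhile PySem.Chars.isspace l)).reverse
        = PySem.Chars.lower (List.dropWhile PySem.Chars.isspace l).reverse by
      simp [PySem.Chars.lower, List.map_reverse]]
  rw [hdw]
  simp [PySem.Chars.lower, List.map_reverse]

theorem pv_dropWhile_idem (p : Char → Bool) (l : List Char) :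
    List.dropWhile p (List.dropWhile p l) = List.dropWhile p l := by
  rw [List.dropWhile_eq_self_iff]
  intro hl
  have hhead := List.head?_dropWhile_not p l
  rw [List.head?_eq_getElem?] at hhead
  simp only [List.getElem?_eq_getElem hl] at hhead
  simpa using hhead

theorem pv_strip_idem (l : List Char) :
    PySem.Chars.strip (PySem.Chars.strip l) = PySem.Chars.strip l := by
  simp only [PySem.Chars.strip, PySem.Chars.lstrip, PySem.Chars.rstrip]
  set p := PySem.Chars.isspace with hp
  set u := List.dropWhile p l with hu
  have hpre : (List.dropWhile p u.reverse).reverse <+: u := by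
    have hs : List.dropWhile p u.reverse <:+ u.reverse := List.dropWhile_suffix p
    have h2 := List.reverse_prefix.mpr hs
    simpa using h2
  have hln : List.dropWhile p (List.dropWhile p u.reverse).reverse
      = (List.dropWhile p u.reverse).reverse := by
    rw [List.dropWhile_eq_self_iff]
    intro hl0
    have hgl := List.IsPrefix.getElem hpre (i := 0) hl0
    rw [hgl]
    have hu0 : 0 < u.length := lt_of_lt_of_le hl0 hpre.length_le
    have hhead := List.head?_dropWhile_not p l
    rw [List.head?_eq_getElem?] at hhead
    rw [← hu] at hhead
    simp only [List.getElem?_eq_getElem hu0] at hhead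
    simpa using hhead
  rw [hln, List.reverse_reverse, pv_dropWhile_idem]

theorem pv_norm_idem (l : List Char) :
    PySem.Chars.lower (PySem.Chars.strip (PySem.Chars.lower (PySem.Chars.strip l)))
      = PySem.Chars.lower (PySem.Chars.strip l) := by
  rw [pv_strip_lower_comm, pv_strip_idem, pv_lower_idem]

-- lower∘strip is idempotent, so A's helper re-normalisation of the already normalised text is a no-op
theorem pv_str_norm (q : String) :
    PySem.Str.lower (PySem.Str.strip (PySem.Str.lower (PySem.Str.strip q)))
      = PySem.Str.lower (PySem.Str.strip q) := by
  simp only [PySem.Str.lower, PySem.Str.strip, String.toList_ofList]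
  rw [pv_norm_idem]

-- membership in the inner fold over the vocabulary at one position
theorem pv_mem_inner (t : List Char) (i : Nat) (vs : List String) (m : PySem.Set String)
    (x : String) :
    x ∈ vs.foldl
        (fun m k => if PySem.Chars.startswith (List.drop i t) k.toList then PySem.Set.add m k else m) m
      ↔ x ∈ m ∨ (x ∈ vs ∧ PySem.Chars.startswith (List.drop i t) x.toList = true) := by
  induction vs generalizing m with
  | nil => simp
  | cons k vs ih =>
      simp only [List.foldl_cons]
      by_cases hk : PySem.Chars.startswith (List.drop i t) k.toList = true
      · rw [if_pos hk, ih]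
        simp only [PySem.Set.mem_add, List.mem_cons]
        constructor
        · rintro (⟨hm | hx⟩ | ⟨hv, hs⟩)
          · exact Or.inl hm
          · exact Or.inr ⟨Or.inl hx, hx ▸ hk⟩
          · exact Or.inr ⟨Or.inr hv, hs⟩
        · rintro (hm | ⟨hv | hv, hs⟩)
          · exact Or.inl (Or.inl hm)
          · exact Or.inl (Or.inr hv)
          · exact Or.inr ⟨hv, hs⟩
      · rw [if_neg hk, ih]
        simp only [List.mem_cons]
        constructor
        · rintro (hm | ⟨hv, hs⟩)
          · exact Or.inl hm
          · exact Or.inr ⟨Or.inr hv, hs⟩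
        · rintro (hm | ⟨hv | hv, hs⟩)
          · exact Or.inl hm
          · exact absurd (hv ▸ hs) hk
          · exact Or.inr ⟨hv, hs⟩

-- membership in the outer fold over positions
theorem pv_mem_outer (t : List Char) (is : List Nat) (m : PySem.Set String) (x : String) :
    x ∈ is.foldl
        (fun m i => pvVocab.foldl
          (fun m k => if PySem.Chars.startswith (List.drop i t) k.toList then PySem.Set.add m k else m) m) m
      ↔ x ∈ m ∨ (x ∈ pvVocab ∧ ∃ i ∈ is, PySem.Chars.startswith (List.drop i t) x.toList = true) := by
  induction is generalizing m with
  | nil => simp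
  | cons i is ih =>
      simp only [List.foldl_cons]
      rw [ih]
      rw [pv_mem_inner]
      simp only [List.mem_cons]
      constructor
      · rintro ((hm | ⟨hv, hs⟩) | ⟨hv, j, hj, hs⟩)
        · exact Or.inl hm
        · exact Or.inr ⟨hv, i, Or.inl rfl, hs⟩
        · exact Or.inr ⟨hv, j, Or.inr hj, hs⟩
      · rintro (hm | ⟨hv, j, hj | hj, hs⟩)
        · exact Or.inl (Or.inl hm)
        · exact Or.inl (Or.inr ⟨hv, hj ▸ hs⟩)
        · exact Or.inr ⟨hv, j, hj, hs⟩

theorem pv_mem_matched (t : List Char) (x : String) :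
    x ∈ pvMatched t ↔ x ∈ pvVocab ∧ ∃ i < t.length, PySem.Chars.startswith (List.drop i t) x.toList = true := by
  unfold pvMatched
  rw [pv_mem_outer]
  simp only [PySem.Set.empty, List.not_mem_nil, false_or, List.mem_range]

-- a nonempty keyword occurs at some scanned position iff it is a substring
theorem pv_occ_iff (t : List Char) (x : String) (hne : x.toList ≠ []) :
    (∃ i < t.length, PySem.Chars.startswith (List.drop i t) x.toList = true)
      ↔ PySem.Chars.isIn x.toList t = true := by
  rw [← PySem.Chars.exists_prefix_drop_iff_isIn]
  constructor
  · rintro ⟨i, _, hs⟩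
    exact ⟨i, (PySem.Chars.startswith_iff _ _).mp hs⟩
  · rintro ⟨j, hpre⟩
    by_cases hj : j < t.length
    · exact ⟨j, hj, (PySem.Chars.startswith_iff _ _).mpr hpre⟩
    · exfalso
      rw [List.drop_eq_nil_of_le (by omega)] at hpre
      exact hne (List.prefix_nil.mp hpre)

-- the bridge: disjointness of the matched set against a keyword list is the negated 'any substring' test
theorem pv_bridge (t : List Char) (L : List String)
    (hv : L.all (fun k => decide (k ∈ pvVocab)) = true)
    (hne : L.all (fun k => !k.toList.isEmpty) = true) :
    PySem.Set.isdisjoint (pvMatched t) L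
      = !(L.any (fun k => PySem.Chars.isIn k.toList t)) := by
  simp only [List.all_eq_true, decide_eq_true_eq, Bool.not_eq_true', List.isEmpty_eq_false_iff] at hv hne
  rw [Bool.eq_iff_iff, PySem.Set.isdisjoint_iff, Bool.not_eq_true', Bool.eq_false_iff,
    Ne, List.any_eq_true]
  constructor
  · rintro hdis ⟨k, hkL, hkIn⟩
    have hmem : k ∈ pvMatched t := by
      rw [pv_mem_matched]
      exact ⟨hv k hkL, (pv_occ_iff t k (hne k hkL)).mpr hkIn⟩
    exact hdis k hmem hkL
  · intro hnone x hx hxL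
    rw [pv_mem_matched] at hx
    exact hnone ⟨x, hxL, (pv_occ_iff t x (hne x hxL)).mp hx.2⟩

set_option maxHeartbeats 2000000 in
theorem chatbot_answer_spec : Claim_equal_chatbot_answer := by
  intro q _
  unfold Spec_chatbot_answer
  simp only [chatbot_answer, chatbot_answer_alt, is_career_related_question]
  simp only [pv_str_norm]
  set t := PySem.Str.lower (PySem.Str.strip q) with ht
  by_cases h0 : t = ""
  · simp only [if_pos h0]
  · simp only [if_neg h0]
    have hB := fun L hv hne => pv_bridge t.toList L hv hne
    rw [hB pvUnrelatedKeywordsB (by decide) (by decide),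
        hB pvCareerKeywordsB (by decide) (by decide)]
    simp only [pvFirstRule, pvRules,
      hB ["engineer", "coding", "software", "tech", "data", "analysis"] (by decide) (by decide),
      hB ["doctor", "medicine", "medical", "health", "nurse"] (by decide) (by decide),
      hB ["musician", "music", "sing", "band"] (by decide) (by decide),
      hB ["athlete", "sports", "fitness", "coach", "physical"] (by decide) (by decide),
      hB ["business", "entrepreneur", "management", "commerce", "marketing", "finance"] (by decide) (by decide),
      hB ["government", "ssc", "upsc", "railway", "banking", "civil service"] (by decide) (by decide),
      hB ["internship", "intern"] (by decide) (by decide),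
      hB ["teacher", "education", "school", "teaching"] (by decide) (by decide),
      hB ["design", "graphic", "ux", "creative", "media", "journalism"] (by decide) (by decide),
      Bool.not_not]
    simp only [PySem.Str.isIn_eq, show pvUnrelatedKeywordsB = pvUnrelatedKeywordsA from rfl,
      show pvCareerKeywordsB = pvCareerKeywordsA from rfl]
    by_cases hu : pvUnrelatedKeywordsA.any (fun k => PySem.Chars.isIn k.toList t.toList) = true
    · simp [hu]
    · simp only [Bool.not_eq_true] at hu
      simp only [hu, Bool.false_or, Bool.false_eq_true, if_false]
      by_cases hc : pvCareerKeywordsA.any (fun k => PySem.Chars.isIn k.toList t.toList) = true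
      · simp only [hc, Bool.not_true, Bool.false_eq_true, if_false]
        rfl
      · simp only [Bool.not_eq_true] at hc
        simp only [hc, Bool.not_false, if_true]
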